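-- pv_equiv track=rewrite | github.com/SoloHard32/MEXC-AI-BOT | live_reason_mapper.py | prioritize_buy_blocks
-- ===== SOURCE A (Python) =====
-- def prioritize_buy_blocks(blocks: list[str]) -> list[str]:
--     priority = {
--         "anomaly_risk_high": 10,
--         "market_data_stale": 15,
--         "post_time_stop_block": 20,
--         "symbol_internal_cooldown": 30,
--         "signal_debounce": 40,
--         "mtf_not_confirmed": 50,
--         "market_noise_high": 60,
--         "expected_edge_too_low": 70,
--         "ai_conf_low": 80,
--         "ai_quality_low": 90,
--         "short_model_weak": 100,
--         "short_signal_spot_only": 110,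
--     }
--     uniq: list[str] = []
--     seen: set[str] = set()
--     for item in blocks:
--         key = str(item or "").strip()
--         if not key or key in seen:
--             continue
--         seen.add(key)
--         uniq.append(key)
--     return sorted(uniq, key=lambda x: priority.get(x, 999))
-- ===== SOURCE B (Python) =====
-- def prioritize_buy_blocks(blocks: list[str]) -> list[str]:
--     order = [
--         "anomaly_risk_high",
--         "market_data_stale",
--         "post_time_stop_block",
--         "symbol_internal_cooldown",
--         "signal_debounce",
--         "mtf_not_confirmed",
--         "market_noise_high",
--         "expected_edge_too_low",
--         "ai_conf_low",
--         "ai_quality_low",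
--         "short_model_weak",
--         "short_signal_spot_only",
--     ]
--     known = set(order)
--     uniq: list[str] = []
--     seen: set[str] = set()
--     for item in blocks:
--         key = str(item or "").strip()
--         if key and key not in seen:
--             seen.add(key)
--             uniq.append(key)
--     present = set(uniq)
--     return [r for r in order if r in present] + [u for u in uniq if u not in known]
-- ===== Notes on version B (the rewrite author's own statement) =====
-- stated objective: alternative
-- what changed: Replaces the comparison sort keyed by the priority dict with a scan of the fixed priority table (already in ascending priority order) emitting known reasons in table order, then unknown reasons in first-seen order.
import Mathlib
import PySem

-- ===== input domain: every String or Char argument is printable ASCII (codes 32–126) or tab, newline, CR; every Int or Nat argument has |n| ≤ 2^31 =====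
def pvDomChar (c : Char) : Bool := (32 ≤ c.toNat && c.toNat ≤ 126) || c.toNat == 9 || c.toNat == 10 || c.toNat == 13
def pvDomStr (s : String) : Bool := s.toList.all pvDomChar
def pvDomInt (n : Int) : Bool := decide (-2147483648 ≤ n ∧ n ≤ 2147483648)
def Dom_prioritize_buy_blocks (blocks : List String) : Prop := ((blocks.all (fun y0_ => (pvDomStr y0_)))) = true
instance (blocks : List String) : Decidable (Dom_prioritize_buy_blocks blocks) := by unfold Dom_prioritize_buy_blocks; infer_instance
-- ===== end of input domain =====

-- B replaces the priority-keyed comparison sort by a scan of the fixed priority table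
-- (already ascending) followed by the unknown reasons in first-seen order (objective: alternative).


-- ===== PORT A =====
-- the dict literal `priority`
def pbbPriority : PySem.Dict String Int := PySem.Dict.ofList
  [("anomaly_risk_high", 10), ("market_data_stale", 15), ("post_time_stop_block", 20),
   ("symbol_internal_cooldown", 30), ("signal_debounce", 40), ("mtf_not_confirmed", 50),
   ("market_noise_high", 60), ("expected_edge_too_low", 70), ("ai_conf_low", 80),
   ("ai_quality_low", 90), ("short_model_weak", 100), ("short_signal_spot_only", 110)]

-- lambda x: priority.get(x, 999)
def pbbKey (x : String) : Int := PySem.Dict.getD pbbPriority x 999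

-- the dedup loop: state (uniq, seen)
def pbbDedup (blocks : List String) : List String × PySem.Set String :=
  blocks.foldl (fun st item =>
    let key := PySem.Str.strip (if item = "" then "" else item)
    if key = "" ∨ PySem.Set.contains st.2 key then st
    else (st.1 ++ [key], PySem.Set.add st.2 key)) ([], PySem.Set.empty)

def prioritize_buy_blocks (blocks : List String) : List String :=
  PySem.List.sorted (pbbDedup blocks).1 pbbKey false

-- ===== PORT B =====
-- the `order` table, ascending by priority
def pbbOrderB : List String :=
  ["anomaly_risk_high", "market_data_stale", "post_time_stop_block",
   "symbol_internal_cooldown", "signal_debounce", "mtf_not_confirmed",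
   "market_noise_high", "expected_edge_too_low", "ai_conf_low",
   "ai_quality_low", "short_model_weak", "short_signal_spot_only"]

-- B's dedup loop (same loop as A's; B keeps it)
def pbbDedupB (blocks : List String) : List String × PySem.Set String :=
  blocks.foldl (fun st item =>
    let key := PySem.Str.strip (if item = "" then "" else item)
    if key = "" ∨ PySem.Set.contains st.2 key then st
    else (st.1 ++ [key], PySem.Set.add st.2 key)) ([], PySem.Set.empty)

def prioritize_buy_blocks_alt (blocks : List String) : List String :=
  let known := PySem.Set.ofList pbbOrderB
  let uniq := (pbbDedupB blocks).1
  let present := PySem.Set.ofList uniq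
  (pbbOrderB.filter (fun r => PySem.Set.contains present r)) ++
    (uniq.filter (fun u => !(PySem.Set.contains known u)))

-- ===== PRECONDITION & SPEC =====
def Spec_prioritize_buy_blocks (blocks : List String) (out : List String) : Prop := out = prioritize_buy_blocks_alt blocks
instance (blocks : List String) (out : List String) : Decidable (Spec_prioritize_buy_blocks blocks out) := by unfold Spec_prioritize_buy_blocks; infer_instance

-- ===== CLAIM (what is proved, stated in full; the proofs are below) =====
def Claim_equal_prioritize_buy_blocks : Prop := ∀ (blocks : List String), Dom_prioritize_buy_blocks blocks → Spec_prioritize_buy_blocks blocks (prioritize_buy_blocks blocks)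

-- ===== LEMMAS AND PROOFS =====

-- the target shape of both results, as membership filters
def pbbSpec (l : List String) : List String :=
  (pbbOrderB.filter (fun r => decide (r ∈ l))) ++ (l.filter (fun u => decide (u ∉ pbbOrderB)))

lemma pbbKey_of_mem : ∀ x ∈ pbbOrderB, pbbKey x < 999 := by decide

lemma pbbKey_of_not_mem (x : String) (hx : x ∉ pbbOrderB) : pbbKey x = 999 := by
  simp only [pbbOrderB, List.mem_cons, List.not_mem_nil, or_false, not_or] at hx
  obtain ⟨h1, h2, h3, h4, h5, h6, h7, h8, h9, h10, h11, h12⟩ := hx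
  simp only [pbbKey, pbbPriority, PySem.Dict.ofList, PySem.Dict.update, List.foldl_cons,
    List.foldl_nil, PySem.Dict.getD_insert, h1, h2, h3, h4, h5, h6, h7, h8, h9, h10, h11, h12,
    if_false]
  simp [PySem.Dict.getD, PySem.Dict.get?, PySem.Dict.empty]

lemma pbbKey_le (x : String) : pbbKey x ≤ 999 := by
  by_cases hx : x ∈ pbbOrderB
  · exact le_of_lt (pbbKey_of_mem x hx)
  · exact le_of_eq (pbbKey_of_not_mem x hx)

lemma pbbOrder_pairwise : pbbOrderB.Pairwise (fun a b => pbbKey a < pbbKey b) := by decide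

-- inserting a known reason x into (known-part ++ unknown-part) lands at x's slot of the table
lemma pbb_insert_known : ∀ (ord : List String) (x : String) (l U : List String),
    ord.Pairwise (fun a b => pbbKey a < pbbKey b) →
    (∀ y ∈ ord, pbbKey y < 999) → (∀ u ∈ U, pbbKey u = 999) →
    x ∈ ord → x ∉ l →
    PySem.List.insertBy (fun a b => decide (pbbKey a < pbbKey b)) x
        ((ord.filter (fun r => decide (r ∈ l))) ++ U)
      = (ord.filter (fun r => decide (r ∈ l ++ [x]))) ++ U := by
  intro ord x l U hpw hlt hU hxo hxl
  induction ord with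
  | nil => simp at hxo
  | cons r ord' ih =>
    rcases List.pairwise_cons.mp hpw with ⟨hr, hpw'⟩
    rcases List.mem_cons.mp hxo with rfl | hxo'
    · -- the head is x itself: x goes in front of everything remaining
      have hxo'' : x ∉ ord' := fun h => lt_irrefl _ (hr x h)
      have hfilt : ord'.filter (fun q => decide (q ∈ l ++ [x]))
          = ord'.filter (fun q => decide (q ∈ l)) := by
        apply List.filter_congr
        intro q hq
        have : q ≠ x := fun h => hxo'' (h ▸ hq)
        simp [List.mem_append, this]
      simp only [List.filter_cons, decide_eq_true_eq]
      rw [if_neg (by simp [hxl]), if_pos (by simp), hfilt]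
      cases h : (ord'.filter (fun q => decide (q ∈ l)) ++ U) with
      | nil => simp [PySem.List.insertBy, h]
      | cons y ys =>
        have hy : y ∈ ord'.filter (fun q => decide (q ∈ l)) ++ U := by
          rw [h]; exact List.mem_cons_self
        have hky : pbbKey x < pbbKey y := by
          rcases List.mem_append.mp hy with hy' | hy'
          · exact hr y (List.mem_of_mem_filter hy')
          · rw [hU y hy']; exact hlt x List.mem_cons_self
        rw [List.cons_append, h]
        simp [PySem.List.insertBy, hky]
    · -- the head r precedes x in the table
      have hrx : r ≠ x := by
        intro h; subst h; exact lt_irrefl _ (hr _ hxo')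
      have ih' := ih hpw' (fun y hy => hlt y (List.mem_cons_of_mem _ hy)) hxo'
      by_cases hrl : r ∈ l
      · simp only [List.filter_cons, decide_eq_true_eq]
        rw [if_pos hrl, if_pos (by simp [hrl])]
        have hnb : ¬ (pbbKey x < pbbKey r) := not_lt_of_gt (hr x hxo')
        simp only [List.cons_append]
        rw [show PySem.List.insertBy (fun a b => decide (pbbKey a < pbbKey b)) x
              (r :: (ord'.filter (fun q => decide (q ∈ l)) ++ U))
            = r :: PySem.List.insertBy (fun a b => decide (pbbKey a < pbbKey b)) x
              (ord'.filter (fun q => decide (q ∈ l)) ++ U) from by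
              simp [PySem.List.insertBy, hnb]]
        rw [ih']
      · have hrlx : r ∉ l ++ [x] := by simp [hrl, hrx]
        simp only [List.filter_cons, decide_eq_true_eq]
        rw [if_neg hrl, if_neg hrlx]
        exact ih'

-- the stable sort of a duplicate-free list is exactly pbbSpec
lemma pbb_sorted_eq_spec : ∀ l : List String, l.Nodup →
    PySem.List.sorted l pbbKey false = pbbSpec l := by
  intro l
  induction l using List.reverseRecOn with
  | nil => intro _; rw [PySem.List.sorted_eq_foldl_insertBy]; simp [pbbSpec]
  | append_singleton l' x ih =>
    intro hnd
    have hnd' : l'.Nodup := (List.nodup_append.mp hnd).1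
    have hxl : x ∉ l' := fun h => (List.nodup_append.mp hnd).2.2 x h x (by simp) rfl
    rw [PySem.List.sorted_eq_foldl_insertBy, List.foldl_append, List.foldl_cons, List.foldl_nil,
      ← PySem.List.sorted_eq_foldl_insertBy, ih hnd']
    by_cases hx : x ∈ pbbOrderB
    · -- known reason: insert into the table part
      have hU : ∀ u ∈ l'.filter (fun u => decide (u ∉ pbbOrderB)), pbbKey u = 999 := by
        intro u hu
        have := List.of_mem_filter hu
        exact pbbKey_of_not_mem u (by simpa using this)
      have hins := pbb_insert_known pbbOrderB x l' (l'.filter (fun u => decide (u ∉ pbbOrderB)))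
        pbbOrder_pairwise pbbKey_of_mem hU hx hxl
      unfold pbbSpec
      rw [hins, List.filter_append]
      simp [hx]
    · -- unknown reason: appended at the very end
      have hall : ∀ y ∈ pbbSpec l', (fun a b => decide (pbbKey a < pbbKey b)) x y = false := by
        intro y _
        have hle := pbbKey_le y
        have hx999 : pbbKey x = 999 := pbbKey_of_not_mem x hx
        simp only [decide_eq_false_iff_not, hx999, not_lt]
        exact hle
      rw [PySem.List.insertBy_of_forall_not_before _ _ _ hall]
      unfold pbbSpec
      rw [List.filter_append]
      have hfilt : pbbOrderB.filter (fun r => decide (r ∈ l' ++ [x]))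
          = pbbOrderB.filter (fun r => decide (r ∈ l')) := by
        apply List.filter_congr
        intro q hq
        have : q ≠ x := fun h => hx (h ▸ hq)
        simp [List.mem_append, this]
      rw [hfilt]
      simp [hx, List.append_assoc]

-- the dedup loop yields a duplicate-free list, and `seen` is its element set
lemma pbbDedup_invariant (blocks : List String) :
    ∀ (st : List String × PySem.Set String), st.1.Nodup →
    (∀ k, PySem.Set.contains st.2 k = true ↔ k ∈ st.1) →
    (blocks.foldl (fun st item =>
      let key := PySem.Str.strip (if item = "" then "" else item)
      if key = "" ∨ PySem.Set.contains st.2 key then st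
      else (st.1 ++ [key], PySem.Set.add st.2 key)) st).1.Nodup := by
  induction blocks with
  | nil => intro st h _; simpa using h
  | cons b bs ih =>
    intro st hnd hseen
    simp only [List.foldl_cons]
    set key := PySem.Str.strip (if b = "" then "" else b) with hkey
    by_cases hc : key = "" ∨ PySem.Set.contains st.2 key = true
    · rw [if_pos hc]; exact ih st hnd hseen
    · rw [if_neg hc]
      have hkm : key ∉ st.1 := fun h => hc (Or.inr ((hseen key).mpr h))
      have hcf : PySem.Set.contains st.2 key = false := by
        cases h : PySem.Set.contains st.2 key
        · rfl
        · exact absurd (Or.inr h) hc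
      apply ih
      · exact List.nodup_append.mpr ⟨hnd, List.nodup_singleton _,
          fun a ha b hb hab => hkm ((hab.trans (by simpa using hb)) ▸ ha)⟩
      · intro k
        have hkm2 : ¬ (key ∈ st.2) := by simpa [PySem.Set.contains] using hcf
        have hs := hseen k
        simp only [PySem.Set.contains, List.contains_eq_mem, decide_eq_true_eq] at hs ⊢
        simp [PySem.Set.add, PySem.Set.contains, hkm2, List.mem_append, hs]

lemma pbbDedup_nodup (blocks : List String) : (pbbDedup blocks).1.Nodup := by
  apply pbbDedup_invariant blocks ([], PySem.Set.empty) List.nodup_nil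
  intro k; simp [PySem.Set.contains, PySem.Set.empty]

-- B's output is pbbSpec of its deduped list
lemma pbb_alt_eq_spec (blocks : List String) :
    prioritize_buy_blocks_alt blocks = pbbSpec ((pbbDedupB blocks).1) := by
  show (pbbOrderB.filter (fun r =>
      PySem.Set.contains (PySem.Set.ofList (pbbDedupB blocks).1) r)) ++
    ((pbbDedupB blocks).1.filter (fun u =>
      !(PySem.Set.contains (PySem.Set.ofList pbbOrderB) u))) = pbbSpec ((pbbDedupB blocks).1)
  unfold pbbSpec
  congr 1
  · apply List.filter_congr
    intro r _
    simp [PySem.Set.contains, PySem.Set.mem_ofList]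
  · apply List.filter_congr
    intro u _
    simp [PySem.Set.contains, PySem.Set.mem_ofList]

lemma pbbDedupB_eq (blocks : List String) : pbbDedupB blocks = pbbDedup blocks := rfl

-- ===== VERDICT (by name: the statement is the Claim_ definition above) =====
theorem prioritize_buy_blocks_spec : Claim_equal_prioritize_buy_blocks := by
  intro blocks _
  unfold Spec_prioritize_buy_blocks
  rw [pbb_alt_eq_spec, pbbDedupB_eq]
  unfold prioritize_buy_blocks
  exact pbb_sorted_eq_spec _ (pbbDedup_nodup blocks)
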